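-- pv_equiv track=rewrite | github.com/jlkeet/pacific-hansard | rag/chunker.py | _get_text_overlap
-- ===== SOURCE A (Python) =====
-- def _get_text_overlap(text: str, overlap_chars: int) -> str:
--     """Get overlap text from the end of current chunk."""
--     if len(text) <= overlap_chars:
--         return text
--
--     # Try to break at word boundaries
--     words = text.split()
--     overlap_text = ""
--
--     for word in reversed(words):
--         test_overlap = word + (' ' + overlap_text if overlap_text else '')
--         if len(test_overlap) > overlap_chars:
--             break
--         overlap_text = test_overlap
--
--     return overlap_text
-- ===== SOURCE B (Python) =====
-- def _get_text_overlap(text: str, overlap_chars: int) -> str: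
--     """Get overlap text from the end of current chunk."""
--     if len(text) <= overlap_chars:
--         return text
--
--     # Drop whole words from the front until the joined remainder fits.
--     words = text.split()
--     rem = len(' '.join(words))
--     i = 0
--     while rem > overlap_chars and i < len(words):
--         rem -= len(words[i]) + 1
--         i += 1
--     return ' '.join(words[i:])
-- ===== Notes on version B (the rewrite author's own statement) =====
-- stated objective: alternative
-- what changed: Replaces A's backward loop that accumulates the overlap by repeated string concatenation with a forward pass that computes the joined length once and drops whole words from the front by length arithmetic until the remainder fits, joining only once at the end.
import Mathlib
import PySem

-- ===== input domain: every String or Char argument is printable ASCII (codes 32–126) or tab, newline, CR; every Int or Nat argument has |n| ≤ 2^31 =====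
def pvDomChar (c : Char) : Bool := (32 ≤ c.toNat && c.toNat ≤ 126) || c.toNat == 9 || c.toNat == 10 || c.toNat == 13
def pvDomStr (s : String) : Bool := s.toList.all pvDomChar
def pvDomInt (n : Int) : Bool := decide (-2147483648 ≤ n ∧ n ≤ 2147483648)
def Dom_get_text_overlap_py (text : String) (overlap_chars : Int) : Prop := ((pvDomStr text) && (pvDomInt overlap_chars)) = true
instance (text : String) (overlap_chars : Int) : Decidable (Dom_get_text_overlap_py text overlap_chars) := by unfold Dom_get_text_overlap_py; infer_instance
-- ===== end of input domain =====

-- B replaces A's backward word-accumulation (string concatenation per word) by a forward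
-- single pass that drops words from the front by length arithmetic until the remainder fits
-- ('alternative' objective: same result, no repeated string building).

-- ===== PORT A =====
-- the 'for word in reversed(words): … break …' loop, word by word
def pvAloop (k : Int) : List (List Char) → List Char → List Char
  | [], acc => acc
  | w :: rest, acc =>
      let t := w ++ (if acc = [] then [] else ' ' :: acc)
      if (t.length : Int) > k then acc
      else pvAloop k rest t

def get_text_overlap_py (text : String) (overlap_chars : Int) : String :=
  if (PySem.Str.len text : Int) ≤ overlap_chars then text
  else
    String.ofList (pvAloop overlap_chars (PySem.Chars.split₀ text.toList).reverse [])

-- ===== PORT B =====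
-- the 'while rem > overlap_chars and i < len(words): …' drop loop (the dropped prefix is
-- represented by recursing into the tail instead of incrementing i)
def pvBdrop (k : Int) : List (List Char) → Int → List (List Char)
  | [], _ => []
  | w :: rest, rem => if rem > k then pvBdrop k rest (rem - ((w.length : Int) + 1)) else w :: rest

def get_text_overlap_py_alt (text : String) (overlap_chars : Int) : String :=
  if (PySem.Str.len text : Int) ≤ overlap_chars then text
  else
    let ws := PySem.Chars.split₀ text.toList
    let rem : Int := ((PySem.Chars.join [' '] ws).length : Int)
    String.ofList (PySem.Chars.join [' '] (pvBdrop overlap_chars ws rem))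

-- ===== PRECONDITION & SPEC =====
def Spec_get_text_overlap_py (text : String) (overlap_chars : Int) (out : String) : Prop := out = get_text_overlap_py_alt text overlap_chars
instance (text : String) (overlap_chars : Int) (out : String) : Decidable (Spec_get_text_overlap_py text overlap_chars out) := by unfold Spec_get_text_overlap_py; infer_instance

-- ===== CLAIM (what is proved, stated in full; the proofs are below) =====
def Claim_equal_get_text_overlap_py : Prop := ∀ (text : String) (overlap_chars : Int), Dom_get_text_overlap_py text overlap_chars → Spec_get_text_overlap_py text overlap_chars (get_text_overlap_py text overlap_chars)

-- ===== LEMMAS AND PROOFS =====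

-- joined length of a word list, as an Int
def pvJL (ws : List (List Char)) : Int := ((PySem.Chars.join [' '] ws).length : Int)

-- the common value both loops compute: the longest suffix of ws whose joined length fits in k
def pvBest (k : Int) : List (List Char) → List (List Char)
  | [] => []
  | w :: rest => if pvJL (w :: rest) ≤ k then w :: rest else pvBest k rest

theorem pvJoin_cons_of_ne (a : List Char) (t : List (List Char)) (h : t ≠ []) :
    PySem.Chars.join [' '] (a :: t) = a ++ ' ' :: PySem.Chars.join [' '] t := by
  cases t with
  | nil => exact absurd rfl h
  | cons b t => rw [PySem.Chars.join_cons_cons]; simp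

theorem pvJL_cons (w : List Char) (t : List (List Char)) (h : t ≠ []) :
    pvJL (w :: t) = (w.length : Int) + 1 + pvJL t := by
  unfold pvJL
  rw [pvJoin_cons_of_ne w t h]
  simp
  omega

theorem pvJoin_ne_nil (w : List Char) (t : List (List Char)) (hw : w ≠ []) :
    PySem.Chars.join [' '] (w :: t) ≠ [] := by
  cases t with
  | nil => rw [PySem.Chars.join_singleton]; exact hw
  | cons b t =>
      rw [pvJoin_cons_of_ne w (b :: t) (by simp)]
      simp

theorem pvBest_eq_self (k : Int) (s : List (List Char)) (h : s = [] ∨ pvJL s ≤ k) :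
    pvBest k s = s := by
  cases s with
  | nil => rfl
  | cons w t =>
      rcases h with h | h
      · exact absurd h (by simp)
      · unfold pvBest; rw [if_pos h]

theorem pvJL_append_ge (l t : List (List Char)) (ht : t ≠ []) : pvJL t ≤ pvJL (l ++ t) := by
  induction l with
  | nil => simp
  | cons x l ih =>
      have hne : l ++ t ≠ [] := by simp [ht]
      have hx : (0 : Int) ≤ (x.length : Int) := Int.natCast_nonneg _
      have := pvJL_cons x (l ++ t) hne
      simp only [List.cons_append] at this ⊢
      omega

theorem pvBest_drop (k : Int) (l : List (List Char)) (w : List Char) (s : List (List Char))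
    (hs : s = [] ∨ pvJL s ≤ k) (hbig : k < pvJL (w :: s)) :
    pvBest k (l ++ w :: s) = s := by
  induction l with
  | nil =>
      simp only [List.nil_append, pvBest]
      rw [if_neg (by omega)]
      exact pvBest_eq_self k s hs
  | cons x l ih =>
      have hne : l ++ w :: s ≠ [] := by simp
      have hge : pvJL (w :: s) ≤ pvJL (l ++ w :: s) := pvJL_append_ge l (w :: s) (by simp)
      have heq : pvJL (x :: (l ++ w :: s)) = (x.length : Int) + 1 + pvJL (l ++ w :: s) :=
        pvJL_cons x (l ++ w :: s) hne
      have hx : (0 : Int) ≤ (x.length : Int) := Int.natCast_nonneg _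
      simp only [List.cons_append, pvBest]
      rw [if_neg (by omega)]
      exact ih

theorem pvBdrop_spec (k : Int) (ws : List (List Char)) (rem : Int)
    (h : ws = [] ∨ rem = pvJL ws) : pvBdrop k ws rem = pvBest k ws := by
  induction ws generalizing rem with
  | nil => rfl
  | cons w rest ih =>
      rcases h with h | h
      · exact absurd h (by simp)
      by_cases hb : rem > k
      · unfold pvBdrop pvBest
        rw [if_pos hb, if_neg (by omega)]
        cases rest with
        | nil => rfl
        | cons b t =>
            apply ih
            right
            rw [h, pvJL_cons w (b :: t) (by simp)]
            ring
      · unfold pvBdrop pvBest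
        rw [if_neg hb, if_pos (by omega)]

theorem pvAloop_spec (k : Int) (rs s : List (List Char))
    (hrs : ∀ w ∈ rs, w ≠ []) (hsw : ∀ w ∈ s, w ≠ []) (hs : s = [] ∨ pvJL s ≤ k) :
    pvAloop k rs (PySem.Chars.join [' '] s) = PySem.Chars.join [' '] (pvBest k (rs.reverse ++ s)) := by
  induction rs generalizing s with
  | nil =>
      simp [pvAloop, pvBest_eq_self k s hs]
  | cons w rest ih =>
      have hw : w ≠ [] := hrs w (by simp)
      have hjoin : w ++ (if PySem.Chars.join [' '] s = [] then [] else ' ' :: PySem.Chars.join [' '] s)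
          = PySem.Chars.join [' '] (w :: s) := by
        cases s with
        | nil => simp [PySem.Chars.join_nil, PySem.Chars.join_singleton]
        | cons b t =>
            have hb : b ≠ [] := hsw b (by simp)
            rw [if_neg (pvJoin_ne_nil b t hb), pvJoin_cons_of_ne w (b :: t) (by simp)]
      have harr : (w :: rest).reverse ++ s = rest.reverse ++ w :: s := by simp
      unfold pvAloop
      rw [hjoin]
      by_cases hb : k < pvJL (w :: s)
      · rw [if_pos (by unfold pvJL at hb; omega), harr, pvBest_drop k rest.reverse w s hs hb]
      · rw [if_neg (by unfold pvJL at hb; omega), harr]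
        have hsw' : ∀ x ∈ w :: s, x ≠ [] := by
          intro x hx
          rw [List.mem_cons] at hx
          rcases hx with rfl | hx
          · exact hw
          · exact hsw x hx
        exact ih (w :: s) (fun x hx => hrs x (List.mem_cons_of_mem _ hx)) hsw' (Or.inr (by omega))

theorem pvSplit₀go_ne_nil (rest cur : List Char) (acc : List (List Char))
    (hacc : ∀ w ∈ acc, w ≠ []) : ∀ w ∈ PySem.Chars.split₀.go rest cur acc, w ≠ [] := by
  induction rest generalizing cur acc with
  | nil =>
      intro w hw
      unfold PySem.Chars.split₀.go at hw
      by_cases hc : cur.isEmpty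
      · rw [if_pos hc] at hw
        exact hacc w (by simpa using hw)
      · rw [if_neg hc] at hw
        rw [List.mem_reverse, List.mem_cons] at hw
        rcases hw with rfl | hw
        · simp only [ne_eq, List.reverse_eq_nil_iff]
          intro h
          subst h
          simp at hc
        · exact hacc w hw
  | cons c rest ih =>
      intro w hw
      unfold PySem.Chars.split₀.go at hw
      by_cases hsp : PySem.Chars.isspace c
      · rw [if_pos hsp] at hw
        by_cases hc : cur.isEmpty
        · rw [if_pos hc] at hw
          exact ih [] acc hacc w hw
        · rw [if_neg hc] at hw
          refine ih [] (cur.reverse :: acc) ?_ w hw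
          intro x hx
          rw [List.mem_cons] at hx
          rcases hx with rfl | hx
          · simp only [ne_eq, List.reverse_eq_nil_iff]
            intro h; subst h; simp at hc
          · exact hacc x hx
      · rw [if_neg hsp] at hw
        exact ih (c :: cur) acc hacc w hw

theorem pvSplit₀_ne_nil (cs : List Char) : ∀ w ∈ PySem.Chars.split₀ cs, w ≠ [] := by
  unfold PySem.Chars.split₀
  exact pvSplit₀go_ne_nil cs [] [] (by simp)

-- ===== VERDICT (by name: the statement is the Claim_ definition above) =====
theorem get_text_overlap_py_spec : Claim_equal_get_text_overlap_py := by
  intro text k _dom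
  unfold Spec_get_text_overlap_py get_text_overlap_py get_text_overlap_py_alt
  by_cases h : (PySem.Str.len text : Int) ≤ k
  · rw [if_pos h, if_pos h]
  · rw [if_neg h, if_neg h]
    have hw := pvSplit₀_ne_nil text.toList
    have := pvAloop_spec k (PySem.Chars.split₀ text.toList).reverse []
      (fun w hx => hw w (by simpa using hx)) (by simp) (Or.inl rfl)
    rw [PySem.Chars.join_nil] at this
    simp only [List.reverse_reverse, List.append_nil] at this
    show String.ofList (pvAloop k (PySem.Chars.split₀ text.toList).reverse []) =
      String.ofList (PySem.Chars.join [' '] (pvBdrop k (PySem.Chars.split₀ text.toList)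
        ((PySem.Chars.join [' '] (PySem.Chars.split₀ text.toList)).length : Int)))
    rw [this, pvBdrop_spec k (PySem.Chars.split₀ text.toList)
      ((PySem.Chars.join [' '] (PySem.Chars.split₀ text.toList)).length : Int)
      (Or.inr rfl)]
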